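-- pv_equiv track=rewrite | github.com/patmorin/anagram-free2 | anagram.py | anagram_suffix
-- ===== SOURCE A (Python) =====
-- import collections
--
-- def equal_histograms(hist0, hist1):
--     for c in hist0:
--         if hist0[c] != hist1[c]: return False
--     for c in hist1:
--         if hist0[c] != hist1[c]: return False
--     return True
--
-- def anagram_suffix(s, amax):
--     """Return half the length of the shortest non-empty suffix of s that is an anagram, or 0 if no such suffix exists"""
--     hist0 = collections.defaultdict(int)
--     hist1 = collections.defaultdict(int)
--     for t in range(1, len(s)//2+1):
--         hist0[s[len(s)-2*t]] += 1
--         hist0[s[len(s)-2*t+1]] += 1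
--         hist0[s[len(s)-t]] -= 1
--         hist1[s[len(s)-t]] += 1
--         if amax < t and equal_histograms(hist0, hist1): return t
--     return 0
-- ===== SOURCE B (Python) =====
-- import collections
--
-- def anagram_suffix(s, amax):
--     """Return half the length of the shortest non-empty suffix of s that is an anagram, or 0 if no such suffix exists"""
--     n = len(s)
--     diff = collections.defaultdict(int)  # counts(first half) - counts(second half) of the length-2t suffix
--     nz = 0                               # number of characters with a nonzero entry in diff
--     for t in range(1, n // 2 + 1):
--         for c, d in ((s[n - 2 * t], 1), (s[n - 2 * t + 1], 1), (s[n - t], -2)):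
--             old = diff[c]
--             new = old + d
--             diff[c] = new
--             nz += (1 if new != 0 else 0) - (1 if old != 0 else 0)
--         if amax < t and nz == 0:
--             return t
--     return 0
-- ===== Notes on version B (the rewrite author's own statement) =====
-- stated objective: alternative
-- what changed: Replaces the two histograms plus a per-step key-scanning equality check with a single signed difference histogram and an incrementally maintained count of nonzero entries, so the equality test becomes an O(1) counter comparison.
import Mathlib
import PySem

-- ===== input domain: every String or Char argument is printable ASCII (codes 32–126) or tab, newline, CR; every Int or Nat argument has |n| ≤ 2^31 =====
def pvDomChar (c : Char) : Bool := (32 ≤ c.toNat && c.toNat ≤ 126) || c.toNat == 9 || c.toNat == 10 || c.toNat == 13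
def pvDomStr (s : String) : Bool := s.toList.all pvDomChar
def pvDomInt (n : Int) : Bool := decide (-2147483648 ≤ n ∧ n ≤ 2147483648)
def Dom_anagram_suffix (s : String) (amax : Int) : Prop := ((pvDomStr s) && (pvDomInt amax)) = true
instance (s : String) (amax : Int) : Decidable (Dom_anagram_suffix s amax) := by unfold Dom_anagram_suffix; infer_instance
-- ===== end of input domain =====

-- B replaces A's two histograms + key-scanning equality check by one signed difference
-- histogram with an incrementally maintained count of its nonzero entries (alternative algorithm).

-- ===== PORT A =====
-- equal_histograms: two sequential loops with early return become two short-circuited `all` passes.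
-- Exact on values: the keys defaultdict inserts with value 0 on a mere read never change the result,
-- since any key where the two histograms differ has a nonzero value in one of them and is therefore
-- among that dict's keys already (every nonzero value was put there by a += / -= write).
def equal_histograms (h0 h1 : PySem.Dict Char Int) : Bool :=
  (h0.keys.all (fun c => h0.getD c 0 == h1.getD c 0)) &&
  (h1.keys.all (fun c => h0.getD c 0 == h1.getD c 0))

-- the for-loop over range(1, len(s)//2+1) with early return, as structural recursion on the range list;
-- all indices are in range for t in that range, so pyGetD's default is never used
def anagramLoopA (s : List Char) (amax : Int) :
    List Int → PySem.Dict Char Int → PySem.Dict Char Int → Int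
  | [], _, _ => 0
  | t :: ts, h0, h1 =>
    let n : Int := s.length
    let h0 := h0.modify (PySem.List.pyGetD s (n - 2*t) ' ') 0 (· + 1)
    let h0 := h0.modify (PySem.List.pyGetD s (n - 2*t + 1) ' ') 0 (· + 1)
    let h0 := h0.modify (PySem.List.pyGetD s (n - t) ' ') 0 (· - 1)
    let h1 := h1.modify (PySem.List.pyGetD s (n - t) ' ') 0 (· + 1)
    if amax < t && equal_histograms h0 h1 then t else anagramLoopA s amax ts h0 h1

def anagram_suffix (s : String) (amax : Int) : Int :=
  anagramLoopA s.toList amax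
    (PySem.List.pyRange 1 (PySem.Int.floordiv (s.toList.length : Int) 2 + 1) 1)
    PySem.Dict.empty PySem.Dict.empty

-- ===== PORT B =====
-- the inner `for c, d in (...)` body of Source B
def bump (st : PySem.Dict Char Int × Int) (c : Char) (d : Int) :
    PySem.Dict Char Int × Int :=
  let old := st.1.getD c 0
  let new := old + d
  (st.1.insert c new,
   st.2 + (if new ≠ 0 then (1 : Int) else 0) - (if old ≠ 0 then (1 : Int) else 0))

def anagramLoopB (s : List Char) (amax : Int) :
    List Int → PySem.Dict Char Int × Int → Int
  | [], _ => 0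
  | t :: ts, st =>
    let n : Int := s.length
    let st := bump st (PySem.List.pyGetD s (n - 2*t) ' ') 1
    let st := bump st (PySem.List.pyGetD s (n - 2*t + 1) ' ') 1
    let st := bump st (PySem.List.pyGetD s (n - t) ' ') (-2)
    if amax < t && st.2 == 0 then t else anagramLoopB s amax ts st

def anagram_suffix_alt (s : String) (amax : Int) : Int :=
  anagramLoopB s.toList amax
    (PySem.List.pyRange 1 (PySem.Int.floordiv (s.toList.length : Int) 2 + 1) 1)
    (PySem.Dict.empty, 0)

-- ===== PRECONDITION & SPEC =====
def Spec_anagram_suffix (s : String) (amax : Int) (out : Int) : Prop := out = anagram_suffix_alt s amax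
instance (s : String) (amax : Int) (out : Int) : Decidable (Spec_anagram_suffix s amax out) := by unfold Spec_anagram_suffix; infer_instance

-- ===== CLAIM (what is proved, stated in full; the proofs are below) =====
def Claim_equal_anagram_suffix : Prop := ∀ (s : String) (amax : Int), Dom_anagram_suffix s amax → Spec_anagram_suffix s amax (anagram_suffix s amax)

-- ===== LEMMAS AND PROOFS =====

-- coupling invariant between A's pair of histograms and B's (diff, nz) state
def AnagInv (h0 h1 diff : PySem.Dict Char Int) (nz : Int) : Prop :=
  (∀ c, h0.getD c 0 - h1.getD c 0 = diff.getD c 0) ∧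
  nz = (diff.keys.countP (fun c => decide (diff.getD c 0 ≠ 0)) : Int) ∧
  diff.keys.Nodup

lemma countP_update {l : List Char} (hnd : l.Nodup) {c : Char} (hc : c ∈ l)
    (p q : Char → Bool) (hagree : ∀ x ∈ l, x ≠ c → p x = q x) :
    (l.countP q : Int) = (l.countP p : Int)
      + (if q c then 1 else 0) - (if p c then 1 else 0) := by
  induction l with
  | nil => cases hc
  | cons a l ih =>
    rcases List.nodup_cons.mp hnd with ⟨hal, hndl⟩
    by_cases hac : a = c
    · subst hac
      have htail : l.countP p = l.countP q := by
        apply List.countP_congr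
        intro x hx
        rw [hagree x (List.mem_cons_of_mem _ hx) (fun h => hal (h ▸ hx))]
      simp only [List.countP_cons, htail]
      by_cases hp : p a <;> by_cases hq : q a <;> simp [hp, hq]
    · have hcl : c ∈ l := by
        rcases List.mem_cons.mp hc with h | h
        · first
          | exact absurd h hac
          | exact absurd h.symm hac
        · exact h
      have := ih hndl hcl (fun x hx hxc => hagree x (List.mem_cons_of_mem _ hx) hxc)
      have hpa : p a = q a := hagree a List.mem_cons_self hac
      simp only [List.countP_cons, hpa]
      by_cases hq : q a <;> simp [hq] at this ⊢ <;> omega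

-- bump preserves the (diff, nz) half of the invariant for any single-key value change
lemma inv_bump (h0' h1' diff : PySem.Dict Char Int) (nz : Int) (c : Char) (d : Int)
    (hval : ∀ x, h0'.getD x 0 - h1'.getD x 0 = diff.getD x 0 + (if x = c then d else 0))
    (hnz : nz = (diff.keys.countP (fun x => decide (diff.getD x 0 ≠ 0)) : Int))
    (hnd : diff.keys.Nodup) :
    AnagInv h0' h1' (bump (diff, nz) c d).1 (bump (diff, nz) c d).2 := by
  have hgetD : ∀ x, (diff.insert c (diff.getD c 0 + d)).getD x 0 =
      if x = c then diff.getD c 0 + d else diff.getD x 0 := by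
    intro x; exact PySem.Dict.getD_insert diff c x (diff.getD c 0 + d) 0
  have hb1 : (bump (diff, nz) c d).1 = diff.insert c (diff.getD c 0 + d) := rfl
  have hb2 : (bump (diff, nz) c d).2 =
      nz + (if diff.getD c 0 + d ≠ 0 then (1 : Int) else 0)
         - (if diff.getD c 0 ≠ 0 then (1 : Int) else 0) := rfl
  refine ⟨?_, ?_, ?_⟩
  · intro x
    rw [hb1]
    rw [hgetD x, hval x]
    by_cases hx : x = c <;> simp [hx]
  · rw [hb1, hb2]
    by_cases hcont : diff.contains c
    · have hkeys : (diff.insert c (diff.getD c 0 + d)).keys = diff.keys :=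
        PySem.Dict.keys_insert_of_contains diff _ hcont
      have hmem : c ∈ diff.keys := (PySem.Dict.contains_iff_mem_keys diff c).mp hcont
      rw [hkeys]
      have := countP_update (l := diff.keys) hnd hmem
        (fun x => decide (diff.getD x 0 ≠ 0))
        (fun x => decide ((diff.insert c (diff.getD c 0 + d)).getD x 0 ≠ 0))
        (by intro x _ hxc; simp [hgetD, hxc])
      rw [hnz]
      simp only at this
      simp only [decide_eq_true_eq] at this
      rw [hgetD c, if_pos rfl] at this
      exact this.symm
    · have hkeys : (diff.insert c (diff.getD c 0 + d)).keys = diff.keys ++ [c] :=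
        PySem.Dict.keys_insert_of_not_contains diff _ (by simpa using hcont)
      have hold : diff.getD c 0 = 0 :=
        PySem.Dict.getD_of_not_contains diff 0 (by simpa using hcont)
      have hnotmem : c ∉ diff.keys := fun h =>
        hcont ((PySem.Dict.contains_iff_mem_keys diff c).mpr h)
      rw [hkeys, List.countP_append]
      have hsame : diff.keys.countP
          (fun x => decide ((diff.insert c (diff.getD c 0 + d)).getD x 0 ≠ 0)) =
          diff.keys.countP (fun x => decide (diff.getD x 0 ≠ 0)) := by
        apply List.countP_congr
        intro x hx
        simp [hgetD, show x ≠ c from fun h => hnotmem (h ▸ hx)]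
      have hsing : [c].countP (fun x => decide ((diff.insert c (diff.getD c 0 + d)).getD x 0 ≠ 0)) =
          if (0 : Int) + d ≠ 0 then 1 else 0 := by
        simp [hold]
      push_cast
      rw [hsame, hsing, hnz, hold]
      push_cast
      split_ifs <;> omega
  · rw [hb1]
    by_cases hcont : diff.contains c
    · rw [PySem.Dict.keys_insert_of_contains diff _ hcont]; exact hnd
    · rw [PySem.Dict.keys_insert_of_not_contains diff _ (by simpa using hcont)]
      refine List.nodup_append.mpr ⟨hnd, List.nodup_singleton c, ?_⟩
      intro x hx y hy
      simp only [List.mem_singleton] at hy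
      subst hy
      intro hxy
      exact hcont ((PySem.Dict.contains_iff_mem_keys diff y).mpr (hxy ▸ hx))

-- under the invariant, A's histogram-equality scan is B's counter test
lemma equal_histograms_eq (h0 h1 diff : PySem.Dict Char Int) (nz : Int)
    (hinv : AnagInv h0 h1 diff nz) :
    equal_histograms h0 h1 = (nz == 0) := by
  obtain ⟨hval, hnz, -⟩ := hinv
  have habsent : ∀ (d : PySem.Dict Char Int) (c : Char), c ∉ d.keys → d.getD c 0 = 0 := by
    intro d c hc
    apply PySem.Dict.getD_of_not_contains
    by_cases h : d.contains c
    · exact absurd ((PySem.Dict.contains_iff_mem_keys d c).mp h) hc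
    · simpa using h
  rw [Bool.eq_iff_iff]
  constructor
  · intro heq
    simp only [equal_histograms, Bool.and_eq_true, List.all_eq_true, beq_iff_eq] at heq
    have hall : ∀ c, h0.getD c 0 = h1.getD c 0 := by
      intro c
      by_cases h0m : c ∈ h0.keys
      · exact heq.1 c h0m
      · by_cases h1m : c ∈ h1.keys
        · exact heq.2 c h1m
        · rw [habsent h0 c h0m, habsent h1 c h1m]
    simp only [hnz]
    simp [List.countP_eq_zero]
    intro a ha
    have h := hval a
    rw [hall a] at h
    omega
  · intro hz
    have hzero : ∀ c, diff.getD c 0 = 0 := by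
      intro c
      by_cases hm : c ∈ diff.keys
      · have hcount : diff.keys.countP (fun x => decide (diff.getD x 0 ≠ 0)) = 0 := by
          have : nz = 0 := by simpa using hz
          omega
        have := List.countP_eq_zero.mp hcount c hm
        simpa using this
      · exact habsent diff c hm
    have hall : ∀ c, h0.getD c 0 = h1.getD c 0 := by
      intro c
      have := hval c
      rw [hzero c] at this
      omega
    simp [equal_histograms, List.all_eq_true, hall]

lemma loop_eq (s : List Char) (amax : Int) (ts : List Int) :
    ∀ (h0 h1 diff : PySem.Dict Char Int) (nz : Int), AnagInv h0 h1 diff nz →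
      anagramLoopA s amax ts h0 h1 = anagramLoopB s amax ts (diff, nz) := by
  induction ts with
  | nil => intro h0 h1 diff nz _; rfl
  | cons t ts ih =>
    intro h0 h1 diff nz hinv
    obtain ⟨hval, hnz, hnd⟩ := hinv
    set n : Int := (s.length : Int) with hn
    set c0 := PySem.List.pyGetD s (n - 2*t) ' ' with hc0
    set c1 := PySem.List.pyGetD s (n - 2*t + 1) ' ' with hc1
    set c2 := PySem.List.pyGetD s (n - t) ' ' with hc2
    -- first bump: h0[c0] += 1
    have hinv1 : AnagInv (h0.modify c0 0 (· + 1)) h1 (bump (diff, nz) c0 1).1 (bump (diff, nz) c0 1).2 := by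
      apply inv_bump _ _ _ _ _ _ _ hnz hnd
      intro x
      rw [PySem.Dict.getD_modify h0 c0 x 0 (· + 1)]
      have hvx := hval x
      have hvc := hval c0
      by_cases hx : x = c0 <;> simp [hx] <;> omega
    obtain ⟨hval1, hnz1, hnd1⟩ := hinv1
    -- second bump: h0[c1] += 1
    have hinv2 : AnagInv ((h0.modify c0 0 (· + 1)).modify c1 0 (· + 1)) h1
        (bump (bump (diff, nz) c0 1) c1 1).1 (bump (bump (diff, nz) c0 1) c1 1).2 := by
      apply inv_bump _ _ _ _ _ _ _ hnz1 hnd1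
      intro x
      rw [PySem.Dict.getD_modify (h0.modify c0 0 (· + 1)) c1 x 0 (· + 1)]
      have hvx := hval1 x
      have hvc := hval1 c1
      by_cases hx : x = c1 <;> simp [hx] <;> omega
    obtain ⟨hval2, hnz2, hnd2⟩ := hinv2
    -- third step: h0[c2] -= 1 and h1[c2] += 1, a net change of -2 at c2
    have hinv3 : AnagInv (((h0.modify c0 0 (· + 1)).modify c1 0 (· + 1)).modify c2 0 (· - 1))
        (h1.modify c2 0 (· + 1))
        (bump (bump (bump (diff, nz) c0 1) c1 1) c2 (-2)).1
        (bump (bump (bump (diff, nz) c0 1) c1 1) c2 (-2)).2 := by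
      apply inv_bump _ _ _ _ _ _ _ hnz2 hnd2
      intro x
      rw [PySem.Dict.getD_modify ((h0.modify c0 0 (· + 1)).modify c1 0 (· + 1)) c2 x 0 (· - 1),
          PySem.Dict.getD_modify h1 c2 x 0 (· + 1)]
      have hvx := hval2 x
      have hvc := hval2 c2
      by_cases hx : x = c2 <;> simp [hx] <;> omega
    show (if amax < t && equal_histograms _ _ then t else anagramLoopA s amax ts _ _) = _
    rw [equal_histograms_eq _ _ _ _ hinv3]
    simp only [anagramLoopB]
    split
    · rfl
    · exact ih _ _ _ _ hinv3

-- ===== VERDICT (by name: the statement is the Claim_ definition above) =====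
theorem anagram_suffix_spec : Claim_equal_anagram_suffix := by
  intro s amax _
  unfold Spec_anagram_suffix anagram_suffix anagram_suffix_alt
  apply loop_eq
  refine ⟨?_, ?_, ?_⟩
  · intro c; simp [PySem.Dict.getD_empty]
  · simp [PySem.Dict.keys_empty]
  · simp [PySem.Dict.keys_empty]
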